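-- pv_equiv track=rewrite | github.com/Mart1n66/school | python/fundamentals/2023.4.py | F
-- ===== SOURCE A (Python) =====
-- def F(A):
--     for j in range(len(A[0])):
--         min = A[0][j]
--         for i in range(len(A)):
--             if A[i][j] < min:
--                 min = A[i][j]
--         for i in range(len(A)):
--             if A[i][j] == min:
--                 A[i][j] = 0
--     return A
-- ===== SOURCE B (Python) =====
-- def F(A):
--     # Transpose first, then one pass per column collecting the argmin index set,
--     # then sparse writes at exactly those positions. Mutates A in place like the original.
--     cols = [[row[j] for row in A] for j in range(len(A[0]))]
--     for j, col in enumerate(cols):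
--         best, hits = col[0], []
--         for i, v in enumerate(col):
--             if v < best:
--                 best, hits = v, [i]
--             elif v == best:
--                 hits.append(i)
--         for i in hits:
--             A[i][j] = 0
--     return A
-- ===== Notes on version B (the rewrite author's own statement) =====
-- stated objective: alternative
-- what changed: B first materializes the transpose (list of columns), then for each column makes a single pass that accumulates the set of argmin indices (resetting it when a smaller value appears) and finally writes zeros only at those collected positions, replacing A's two full value-comparing scans per column.
import Mathlib
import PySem

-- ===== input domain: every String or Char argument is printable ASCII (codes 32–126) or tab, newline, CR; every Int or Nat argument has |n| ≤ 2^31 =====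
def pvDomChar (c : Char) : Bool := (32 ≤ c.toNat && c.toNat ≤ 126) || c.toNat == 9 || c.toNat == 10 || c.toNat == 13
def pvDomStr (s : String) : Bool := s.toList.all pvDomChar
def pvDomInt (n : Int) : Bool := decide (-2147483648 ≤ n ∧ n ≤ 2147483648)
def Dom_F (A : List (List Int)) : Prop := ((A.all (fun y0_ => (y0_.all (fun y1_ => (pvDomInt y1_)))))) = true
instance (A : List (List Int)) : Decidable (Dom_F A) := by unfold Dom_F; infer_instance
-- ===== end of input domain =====

-- B transposes with zip, then per column a SINGLE pass accumulating the argmin index set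
-- followed by sparse writes at those positions, instead of A's two full per-column scans;
-- same cost, different algorithmic decomposition. Both mutate A in place at the same cells;
-- the theorems are about the returned value.

-- ===== PORT A =====
-- A[i][j] read; in-range on Pre_ (out of range Python raises, excluded by Pre_F)
def pvGetE (M : List (List Int)) (i j : Nat) : Int := (M.getD i []).getD j 0

-- the strict-< running-minimum loop of A for column j
def pvColMinA (M : List (List Int)) (j : Nat) : Int :=
  (List.range M.length).foldl
    (fun mv i => if pvGetE M i j < mv then pvGetE M i j else mv) (pvGetE M 0 j)

-- A's second inner loop: set A[i][j] = 0 for every i with A[i][j] == min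
def pvZero (j : Nat) (v : Int) (M : List (List Int)) : List (List Int) :=
  M.map (fun row => if row.getD j 0 == v then row.set j 0 else row)

def F (A : List (List Int)) : List (List Int) :=
  (List.range (A.headD []).length).foldl (fun M j => pvZero j (pvColMinA M j) M) A

-- ===== PORT B =====
-- enumerate(xs) with a Nat counter; exact for Python's enumerate since its indices are ≥ 0
def pvEnum {α : Type} (k : Nat) : List α → List (Nat × α)
  | [] => []
  | x :: t => (k, x) :: pvEnum (k + 1) t

-- one step of B's single scan: reset the hit list on a strictly smaller value, append on a tie
def pvScanStep (s : Int × List Nat) (p : Nat × Int) : Int × List Nat :=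
  if p.2 < s.1 then (p.2, [p.1]) else if p.2 == s.1 then (s.1, s.2 ++ [p.1]) else s

-- B's inner loop: single pass over the column collecting (best, argmin indices)
def pvColScan (col : List Int) : Int × List Nat :=
  (pvEnum 0 col).foldl pvScanStep (col.headD 0, [])

-- A[i][j] = 0
def pvWriteZero (j : Nat) (M : List (List Int)) (i : Nat) : List (List Int) :=
  M.set i ((M.getD i []).set j 0)

def F_alt (A : List (List Int)) : List (List Int) :=
  -- cols = [[row[j] for row in A] for j in range(len(A[0]))]; in-range on Pre_ (else Python raises)
  (pvEnum 0 ((List.range (A.headD []).length).map (fun j => A.map (fun r => r.getD j 0)))).foldl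
    (fun M jc => ((pvColScan jc.2).2).foldl (pvWriteZero jc.1) M) A

-- ===== PRECONDITION & SPEC =====
-- Pre_F excludes exactly the inputs where Python A (and B) raises IndexError: the empty
-- matrix (len(A[0])) and matrices with a row shorter than the first row (A[i][j] / row[j]).
def Pre_F (A : List (List Int)) : Prop :=
  A ≠ [] ∧ ∀ row ∈ A, (A.headD []).length ≤ row.length
instance (A : List (List Int)) : Decidable (Pre_F A) := by unfold Pre_F; infer_instance

def pvWitness_F : List (List Int) := [[1, 2], [3, 2]]

def Spec_F (A : List (List Int)) (out : List (List Int)) : Prop := out = F_alt A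
instance (A : List (List Int)) (out : List (List Int)) : Decidable (Spec_F A out) := by unfold Spec_F; infer_instance

-- ===== CLAIM (what is proved, stated in full; the proofs are below) =====
def Claim_equal_F : Prop := ∀ (A : List (List Int)), Dom_F A → Pre_F A → Spec_F A (F A)

-- ===== LEMMAS AND PROOFS =====

-- column j of M, as read through getD (out of range reads give the default 0)
def pvCol (M : List (List Int)) (j : Nat) : List Int := M.map (fun row => row.getD j 0)

-- A's running-minimum loop expressed on a bare column
def pvColMinOf (c : List Int) : Int :=
  (List.range c.length).foldl
    (fun mv i => if c.getD i 0 < mv then c.getD i 0 else mv) (c.getD 0 0)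

-- the positions (offset k) of the occurrences of m in c
def pvIdxs (k : Nat) (c : List Int) (m : Int) : List Nat :=
  match c with
  | [] => []
  | v :: t => (if v = m then [k] else []) ++ pvIdxs (k + 1) t m

theorem pvGetE_eq_col (M : List (List Int)) (i j : Nat) :
    pvGetE M i j = (pvCol M j).getD i 0 := by
  simp [pvGetE, pvCol, List.getD_eq_getElem?_getD, List.getElem?_map]
  cases h : M[i]? with
  | none => simp
  | some r => simp

theorem pvColMinA_eq_colMinOf (M : List (List Int)) (j : Nat) :
    pvColMinA M j = pvColMinOf (pvCol M j) := by
  unfold pvColMinA pvColMinOf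
  have hl : (pvCol M j).length = M.length := by simp [pvCol]
  rw [hl]
  simp only [pvGetE_eq_col]

theorem pvIndexFold_min (t : List Int) (x : Int) :
    (List.range t.length).foldl
      (fun mv i => if t.getD i 0 < mv then t.getD i 0 else mv) x = t.foldl min x := by
  induction t generalizing x with
  | nil => simp
  | cons a t ih =>
    simp only [List.length_cons, List.range_succ_eq_map, List.foldl_cons, List.foldl_map,
      List.getD_cons_zero, List.getD_cons_succ]
    rw [ih]
    congr 1
    simp only [min_def]
    split_ifs <;> omega

theorem pvColMinOf_cons (x : Int) (t : List Int) :
    pvColMinOf (x :: t) = t.foldl min x := by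
  unfold pvColMinOf
  simp only [List.length_cons, List.range_succ_eq_map, List.foldl_cons, List.foldl_map,
    List.getD_cons_zero, List.getD_cons_succ]
  rw [if_neg (lt_irrefl x), pvIndexFold_min]

theorem pvFoldlMin_le (t : List Int) (a : Int) : t.foldl min a ≤ a := by
  induction t generalizing a with
  | nil => simp
  | cons x t ih => exact le_trans (ih (min a x)) (min_le_left a x)

-- the single scan computes the running min and the positions of its occurrences
theorem pvScan_fold (c : List Int) (k : Nat) (b : Int) (h : List Nat) :
    (pvEnum k c).foldl pvScanStep (b, h) =
      (c.foldl min b, (if c.foldl min b = b then h else []) ++ pvIdxs k c (c.foldl min b)) := by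
  induction c generalizing k b h with
  | nil => simp [pvEnum, pvIdxs]
  | cons v t ih =>
    simp only [pvEnum, List.foldl_cons, pvIdxs, List.foldl_cons]
    by_cases hlt : v < b
    · rw [show pvScanStep (b, h) (k, v) = (v, [k]) by simp [pvScanStep, hlt]]
      rw [ih]
      have hm : min b v = v := min_eq_right (le_of_lt hlt)
      simp only [hm]
      have hle : t.foldl min v ≤ v := pvFoldlMin_le t v
      have hne : t.foldl min v ≠ b := by omega
      rw [if_neg hne]
      by_cases he : t.foldl min v = v
      · rw [if_pos he, if_pos he.symm]; simp
      · rw [if_neg he, if_neg (fun hh => he hh.symm)]; simp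
    · by_cases heq : v = b
      · subst heq
        rw [show pvScanStep (v, h) (k, v) = (v, h ++ [k]) by simp [pvScanStep]]
        rw [ih]; simp only [min_self]
        by_cases he : t.foldl min v = v
        · rw [if_pos he, if_pos he, if_pos he.symm]; simp
        · rw [if_neg he, if_neg he, if_neg (fun hh => he hh.symm)]; simp
      · rw [show pvScanStep (b, h) (k, v) = (b, h) by
            simp [pvScanStep, hlt]; intro hh; exact absurd hh heq]
        rw [ih]
        have hm : min b v = b := min_eq_left (by omega)
        simp only [hm]
        have hle : t.foldl min b ≤ b := pvFoldlMin_le t b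
        have hne : v ≠ t.foldl min b := by omega
        rw [if_neg hne]
        simp

theorem pvColScan_snd (c : List Int) (hc : c ≠ []) :
    (pvColScan c).2 = pvIdxs 0 c (pvColMinOf c) := by
  cases c with
  | nil => exact absurd rfl hc
  | cons x t =>
    unfold pvColScan
    rw [pvScan_fold]
    simp only [List.headD_cons, List.foldl_cons, min_self, pvColMinOf_cons]
    split_ifs <;> simp

-- writes at positions ≥ k+1 leave the head row alone
theorem pvWrites_shift (c : List Int) (v : Int) (j k : Nat) (r : List Int)
    (M : List (List Int)) :
    (pvIdxs (k + 1) c v).foldl (pvWriteZero j) (r :: M)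
      = r :: (pvIdxs k c v).foldl (pvWriteZero j) M := by
  induction c generalizing k M with
  | nil => simp [pvIdxs]
  | cons x t ih =>
    simp only [pvIdxs, List.foldl_append]
    by_cases hx : x = v
    · rw [if_pos hx, if_pos hx]
      simp only [List.foldl_cons, List.foldl_nil]
      have hw : pvWriteZero j (r :: M) (k + 1) = r :: pvWriteZero j M k := by
        simp [pvWriteZero]
      rw [hw]
      exact ih (k + 1) (pvWriteZero j M k)
    · rw [if_neg hx, if_neg hx]
      simp only [List.foldl_nil]
      exact ih (k + 1) M

-- A's zeroing pass equals sparse writes at the positions of v in column j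
theorem pvZero_eq_writes (M : List (List Int)) (j : Nat) (v : Int) :
    pvZero j v M = (pvIdxs 0 (pvCol M j) v).foldl (pvWriteZero j) M := by
  induction M with
  | nil => simp [pvZero, pvCol, pvIdxs]
  | cons r M ih =>
    simp only [pvZero, List.map_cons, pvCol, pvIdxs, List.foldl_append]
    by_cases hr : r.getD j 0 = v
    · rw [if_pos hr, if_pos (by simpa [List.getD_eq_getElem?_getD] using hr)]
      simp only [List.foldl_cons, List.foldl_nil]
      have hw : pvWriteZero j (r :: M) 0 = r.set j 0 :: M := by
        simp [pvWriteZero]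
      rw [hw, pvWrites_shift]
      simp only [pvZero, pvCol] at ih
      rw [ih]
    · rw [if_neg hr, if_neg (by simpa [List.getD_eq_getElem?_getD] using hr)]
      simp only [List.foldl_nil]
      rw [pvWrites_shift]
      simp only [pvZero, pvCol] at ih
      rw [ih]

-- a write in column j leaves every other column unchanged
theorem pvCol_write_ne (M : List (List Int)) (j j' i : Nat) (h : j ≠ j') :
    pvCol (pvWriteZero j M i) j' = pvCol M j' := by
  induction M generalizing i with
  | nil => simp [pvWriteZero]
  | cons r M ih =>
    cases i with
    | zero =>
      simp only [pvWriteZero, List.set_cons_zero, List.getD_cons_zero, pvCol, List.map_cons]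
      congr 1
      simp only [List.getD_eq_getElem?_getD, List.getElem?_set_ne h]
    | succ i =>
      have hw : pvWriteZero j (r :: M) (i + 1) = r :: pvWriteZero j M i := by
        simp [pvWriteZero]
      rw [hw]
      simp only [pvCol, List.map_cons]
      have := ih i
      simp only [pvCol] at this
      rw [this]

theorem pvCol_writes_ne (is : List Nat) (M : List (List Int)) (j j' : Nat) (h : j ≠ j') :
    pvCol (is.foldl (pvWriteZero j) M) j' = pvCol M j' := by
  induction is generalizing M with
  | nil => rfl
  | cons i is ih =>
    simp only [List.foldl_cons]
    rw [ih, pvCol_write_ne _ _ _ _ h]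

-- the heart of the equivalence: A's fold (recomputed min + full zero pass) equals B's
-- fold (writes at the precomputed argmin positions of the ORIGINAL columns), as long as
-- the pending columns are untouched
theorem pvFold_AB (A : List (List Int)) (js : List Nat) (hnd : js.Nodup)
    (M : List (List Int)) (hcols : ∀ j ∈ js, pvCol M j = pvCol A j) :
    js.foldl (fun M j => pvZero j (pvColMinA M j) M) M
      = js.foldl (fun M j =>
          (pvIdxs 0 (pvCol A j) (pvColMinOf (pvCol A j))).foldl (pvWriteZero j) M) M := by
  induction js generalizing M with
  | nil => rfl
  | cons j js ih =>
    simp only [List.foldl_cons]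
    have hstep : pvZero j (pvColMinA M j) M
        = (pvIdxs 0 (pvCol A j) (pvColMinOf (pvCol A j))).foldl (pvWriteZero j) M := by
      rw [pvColMinA_eq_colMinOf, hcols j (List.mem_cons_self), pvZero_eq_writes,
        hcols j (List.mem_cons_self)]
    rw [hstep]
    apply ih (List.Nodup.of_cons hnd)
    intro j' hj'
    have hne : j ≠ j' := by
      rintro rfl
      exact (List.nodup_cons.mp hnd).1 hj'
    rw [pvCol_writes_ne _ _ _ _ hne, hcols j' (List.mem_cons_of_mem _ hj')]

theorem pvEnum_map_range {α : Type} (m k : Nat) (f : Nat → α) :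
    pvEnum k ((List.range' k m).map f) = (List.range' k m).map (fun j => (j, f j)) := by
  induction m generalizing k with
  | zero => simp [pvEnum]
  | succ m ih => simp [List.range'_succ, pvEnum, ih]

-- ===== VERDICT (by name: the statement is the Claim_ definition above) =====
theorem F_spec : Claim_equal_F := by
  intro A _ hp
  unfold Spec_F F F_alt
  have hrange : List.range (A.headD []).length = List.range' 0 (A.headD []).length :=
    List.range_eq_range'
  rw [hrange, pvEnum_map_range, List.foldl_map]
  have hAne : A ≠ [] := hp.1
  have hcolne : ∀ j : Nat, pvCol A j ≠ [] := by
    intro j hcc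
    apply hAne
    cases A with
    | nil => rfl
    | cons r t => simp [pvCol] at hcc
  calc (List.range' 0 (A.headD []).length).foldl (fun M j => pvZero j (pvColMinA M j) M) A
      = (List.range' 0 (A.headD []).length).foldl (fun M j =>
          (pvIdxs 0 (pvCol A j) (pvColMinOf (pvCol A j))).foldl (pvWriteZero j) M) A := by
        rw [← hrange]
        exact pvFold_AB A _ List.nodup_range A (fun _ _ => rfl)
    _ = (List.range' 0 (A.headD []).length).foldl (fun M j =>
          (pvColScan (A.map (fun r => r.getD j 0))).2.foldl (pvWriteZero j) M) A := by
        apply PySem.List.foldl_congr_mem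
        intro acc j _
        have : (pvColScan (pvCol A j)).2 = pvIdxs 0 (pvCol A j) (pvColMinOf (pvCol A j)) :=
          pvColScan_snd _ (hcolne j)
        simp only [pvCol] at this
        rw [this]
        rfl
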